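-- pv_equiv track=rewrite | github.com/alzado/analytics-dashboard | backend/services/rollup_service.py | generate_dimension_combinations
-- ===== SOURCE A (Python) =====
-- from typing import List, Dict, Optional, Tuple, Set
-- from itertools import combinations
--
-- def generate_dimension_combinations(dimensions: List[str]) -> List[List[str]]:
--     """
--     Generate all subsets of dimensions, always including 'date' as the baseline.
--
--     This creates the power set for rollup generation. When creating a rollup
--     with dimensions [A, B, C], this generates all possible combinations,
--     always ensuring 'date' is included:
--     - [date] (baseline - date only)
--     - [date, A], [date, B], [date, C]
--     - [date, A, B], [date, A, C], [date, B, C]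
--     - [date, A, B, C]
--
--     Args:
--         dimensions: List of dimension IDs (should include 'date')
--
--     Returns:
--         List of dimension combinations (each is a sorted list for consistency)
--     """
--     # Separate date from other dimensions
--     other_dims = [d for d in dimensions if d != 'date']
--     sorted_other_dims = sorted(other_dims)
--
--     all_combinations = [['date']]  # Start with date-only baseline
--
--     # Generate combinations of other dimensions (length 1 to n), always adding 'date'
--     for r in range(1, len(sorted_other_dims) + 1):
--         for combo in combinations(sorted_other_dims, r):
--             # Always include 'date' with each combination
--             all_combinations.append(['date'] + list(combo))
--
--     return all_combinations
-- ===== SOURCE B (Python) =====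
-- def generate_dimension_combinations(dimensions):
--     """Single right-to-left DP pass building all size-r combination rows at once,
--     instead of calling itertools.combinations separately for each size r."""
--     sorted_other = sorted(d for d in dimensions if d != 'date')
--     rows = [[[]]]  # rows[r] = size-r combinations of the processed suffix, in order
--     for x in reversed(sorted_other):
--         rows = [[[]]] + [[[x] + c for c in prev] + cur
--                          for prev, cur in zip(rows, rows[1:] + [[]])]
--     return [['date'] + c for row in rows for c in row]
-- ===== Notes on version B (the rewrite author's own statement) =====
-- stated objective: alternative
-- what changed: Replaces A's per-size itertools.combinations loops with a single right-to-left dynamic-programming pass that maintains one row of size-r combinations per r and extends all rows at once per dimension.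
import Mathlib
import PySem

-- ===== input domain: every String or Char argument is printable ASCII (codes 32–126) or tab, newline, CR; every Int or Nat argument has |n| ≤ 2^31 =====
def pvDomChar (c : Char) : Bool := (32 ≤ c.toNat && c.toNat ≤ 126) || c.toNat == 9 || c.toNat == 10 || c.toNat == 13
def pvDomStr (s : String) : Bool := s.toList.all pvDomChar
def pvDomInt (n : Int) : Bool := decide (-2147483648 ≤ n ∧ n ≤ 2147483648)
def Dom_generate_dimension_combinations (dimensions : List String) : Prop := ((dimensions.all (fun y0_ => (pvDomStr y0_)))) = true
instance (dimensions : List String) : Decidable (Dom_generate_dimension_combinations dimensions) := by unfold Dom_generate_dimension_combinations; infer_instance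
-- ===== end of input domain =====

-- B replaces A's per-size itertools.combinations loops by one right-to-left DP pass
-- that builds every size-r combination row simultaneously (objective: alternative).

-- ===== PORT A =====
-- exact port of itertools.combinations(pool, r) over a list pool: tuples in
-- lexicographic order of their index tuples, i.e. take-head-first recursion
def combinationsPy (r : Nat) (pool : List String) : List (List String) :=
  match r, pool with
  | 0, _ => [[]]
  | _ + 1, [] => []
  | r + 1, x :: xs => (combinationsPy r xs).map (fun c => x :: c) ++ combinationsPy (r + 1) xs

def generate_dimension_combinations (dimensions : List String) : List (List String) :=
  let other_dims := dimensions.filter (fun d => d ≠ "date")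
  let sorted_other_dims := PySem.List.sorted other_dims (fun d => d) false
  (PySem.List.pyRange 1 ((sorted_other_dims.length : Int) + 1) 1).foldl
    (fun acc r =>
      (combinationsPy r.toNat sorted_other_dims).foldl
        (fun acc2 combo => acc2 ++ [["date"] ++ combo]) acc)
    [["date"]]

-- ===== PORT B =====
def stepRows (x : String) (rows : List (List (List String))) : List (List (List String)) :=
  [[]] :: List.zipWith (fun prev cur => prev.map (fun c => x :: c) ++ cur) rows (rows.drop 1 ++ [[]])

def generate_dimension_combinations_alt (dimensions : List String) : List (List String) :=
  let sorted_other := PySem.List.sorted (dimensions.filter (fun d => d ≠ "date")) (fun d => d) false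
  let rows := sorted_other.reverse.foldl (fun rows x => stepRows x rows) [[[]]]
  rows.flatMap (fun row => row.map (fun c => "date" :: c))

-- ===== PRECONDITION & SPEC =====
def Spec_generate_dimension_combinations (dimensions : List String) (out : List (List String)) : Prop := out = generate_dimension_combinations_alt dimensions
instance (dimensions : List String) (out : List (List String)) : Decidable (Spec_generate_dimension_combinations dimensions out) := by unfold Spec_generate_dimension_combinations; infer_instance

-- ===== CLAIM (what is proved, stated in full; the proofs are below) =====
def Claim_equal_generate_dimension_combinations : Prop := ∀ (dimensions : List String), Dom_generate_dimension_combinations dimensions → Spec_generate_dimension_combinations dimensions (generate_dimension_combinations dimensions)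

-- ===== LEMMAS AND PROOFS =====

-- rows[r] after processing suffix ys is combinationsPy r ys
def rowsSpec (ys : List String) : List (List (List String)) :=
  (List.range (ys.length + 1)).map (fun r => combinationsPy r ys)

lemma combinationsPy_nil_of_lt : ∀ (ys : List String) (r : Nat), ys.length < r →
    combinationsPy r ys = [] := by
  intro ys
  induction ys with
  | nil =>
    intro r h
    cases r with
    | zero => omega
    | succ r => rfl
  | cons y ys ih =>
    intro r h
    cases r with
    | zero => omega
    | succ r =>
      simp only [List.length_cons] at h
      simp only [combinationsPy]
      rw [ih r (by omega), ih (r + 1) (by omega)]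
      rfl

lemma stepRows_rowsSpec (x : String) (ys : List String) :
    stepRows x (rowsSpec ys) = rowsSpec (x :: ys) := by
  unfold stepRows rowsSpec
  apply List.ext_getElem
  · simp only [List.length_cons, List.length_zipWith, List.length_map, List.length_range,
      List.length_append, List.length_drop]
    omega
  · intro i h1 h2
    simp only [List.length_cons] at h2
    cases i with
    | zero => simp [combinationsPy]
    | succ i =>
      have hi : i < ys.length + 1 := by
        simp [List.length_zipWith] at h1; omega
      simp only [List.getElem_cons_succ, List.getElem_zipWith, List.getElem_map,
        List.getElem_range]
      rcases Nat.lt_or_ge (i + 1) (ys.length + 1) with h | h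
      · rw [List.getElem_append_left (by simpa using h)]
        simp [combinationsPy]
      · have : i = ys.length := by omega
        subst this
        rw [List.getElem_append_right (by simp)]
        simp [combinationsPy, combinationsPy_nil_of_lt ys (ys.length + 1) (by omega)]

lemma foldl_stepRows (l : List String) :
    l.reverse.foldl (fun rows x => stepRows x rows) [[[]]] = rowsSpec l := by
  rw [List.foldl_reverse]
  induction l with
  | nil => rfl
  | cons x l ih => rw [List.foldr_cons, ih, stepRows_rowsSpec]

lemma foldl_append_singleton (l : List (List String)) :
    ∀ acc, l.foldl (fun acc2 combo => acc2 ++ [["date"] ++ combo]) acc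
      = acc ++ l.map (fun c => "date" :: c) := by
  induction l with
  | nil => simp
  | cons c l ih => intro acc; rw [List.foldl_cons, ih]; simp

lemma A_fold (s : List String) (n : Nat) :
    (List.range n).foldl
      (fun acc k => (combinationsPy (k + 1) s).foldl
        (fun acc2 combo => acc2 ++ [["date"] ++ combo]) acc) [["date"]]
    = ((List.range (n + 1)).map (fun r => combinationsPy r s)).flatMap
        (fun row => row.map (fun c => "date" :: c)) := by
  induction n with
  | zero => simp [combinationsPy]
  | succ n ih =>
    rw [List.range_succ, List.foldl_append, ih, List.range_succ (n := n + 1),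
      List.map_append, List.flatMap_append]
    simp only [List.foldl_cons, List.foldl_nil]
    rw [foldl_append_singleton]
    simp

theorem generate_dimension_combinations_spec : Claim_equal_generate_dimension_combinations := by
  intro dimensions _
  show generate_dimension_combinations dimensions = generate_dimension_combinations_alt dimensions
  simp only [generate_dimension_combinations, generate_dimension_combinations_alt]
  rw [foldl_stepRows]
  set s := PySem.List.sorted (dimensions.filter (fun d => d ≠ "date")) (fun d => d) false with hs
  rw [PySem.List.pyRange_one]
  have hn : (((s.length : Int) + 1) - 1).toNat = s.length := by omega
  rw [hn, List.foldl_map]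
  unfold rowsSpec
  have hfun : (fun (acc : List (List String)) (k : Nat) =>
      (combinationsPy ((1 : Int) + (k : Int)).toNat s).foldl
        (fun acc2 combo => acc2 ++ [["date"] ++ combo]) acc)
    = (fun acc k => (combinationsPy (k + 1) s).foldl
        (fun acc2 combo => acc2 ++ [["date"] ++ combo]) acc) := by
    funext acc k
    have hk : ((1 : Int) + (k : Int)).toNat = k + 1 := by omega
    rw [hk]
  rw [hfun, A_fold]
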